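-- pv_equiv track=rewrite | github.com/Gowthambalan/GridthonAI | state.py | resolve_to_sections
-- ===== SOURCE A (Python) =====
-- def resolve_to_sections(tree, office_id):
--     """Walk tree from any node down to all leaf sections."""
--     result = []
--
--     def dfs(oid):
--         children = tree.get(oid, [])
--         if not children:          # leaf → SECTION
--             result.append(oid)
--             return
--         for c in children:
--             dfs(c)
--
--     dfs(office_id)
--     return result
-- ===== SOURCE B (Python) =====
-- def resolve_to_sections(tree, office_id):
--     """Level-wise rewriting: repeatedly replace each non-leaf node in the current
--     list by its children (in place, preserving left-to-right order) until only
--     leaves remain; that list is exactly the DFS leaf order."""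
--     level = [office_id]
--     while True:
--         nxt = []
--         changed = False
--         for x in level:
--             children = tree.get(x, [])
--             if children:
--                 nxt.extend(children)
--                 changed = True
--             else:
--                 nxt.append(x)
--         if not changed:
--             return level
--         level = nxt
-- ===== Notes on version B (the rewrite author's own statement) =====
-- stated objective: alternative
-- what changed: Replaced the recursive per-node DFS that mutates a shared result list with a level-wise rewriting loop that repeatedly replaces every non-leaf in the whole frontier list by its children until only leaves remain (left-to-right order is preserved, so the resulting leaf list is identical).
import Mathlib
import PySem

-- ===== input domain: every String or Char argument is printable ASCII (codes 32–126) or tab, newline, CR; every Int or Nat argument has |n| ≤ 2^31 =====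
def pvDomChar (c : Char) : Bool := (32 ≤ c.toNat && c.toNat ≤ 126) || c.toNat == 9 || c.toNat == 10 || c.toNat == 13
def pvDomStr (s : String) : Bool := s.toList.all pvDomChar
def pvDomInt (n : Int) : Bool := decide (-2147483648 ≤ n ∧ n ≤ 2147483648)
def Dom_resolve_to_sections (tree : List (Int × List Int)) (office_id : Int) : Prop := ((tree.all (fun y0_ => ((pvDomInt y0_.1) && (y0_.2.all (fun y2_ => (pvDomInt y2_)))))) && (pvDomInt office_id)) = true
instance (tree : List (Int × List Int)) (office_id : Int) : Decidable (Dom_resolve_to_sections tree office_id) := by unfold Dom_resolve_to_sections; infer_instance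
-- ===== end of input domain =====

-- B replaces A's recursive per-node DFS by a level-wise rewriting loop over the whole
-- frontier list (alternative decomposition, same cost); equivalence is proved on Pre_
-- (no cycle reachable from office_id, where the Python A would raise RecursionError).


-- ===== PORT A =====
-- tree.get(oid, []) on the association list (dict in insertion order, first match)
def treeGetD (tree : List (Int × List Int)) (oid : Int) : List Int :=
  match tree.find? (fun p => p.1 == oid) with
  | some p => p.2
  | none => []

-- dfs(oid) with its shared mutable `result` threaded as the accumulator `res`.
-- The Nat argument is a fuel/totality guard on recursion DEPTH only: under
-- Pre_ (no reachable cycle) depth ≤ tree.length, so fuel tree.length+1 never runs out.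
def dfsA (tree : List (Int × List Int)) : Nat → Int → List Int → List Int
  | 0, _, res => res   -- fuel exhausted: unreachable under Pre_ (Python raises RecursionError on cycles)
  | n+1, oid, res =>
      let children := treeGetD tree oid
      if children = [] then res ++ [oid]
      else children.foldl (fun r c => dfsA tree n c r) res

def resolve_to_sections (tree : List (Int × List Int)) (office_id : Int) : List Int :=
  dfsA tree (tree.length + 1) office_id []

-- ===== PORT B =====
-- one pass of Source B's inner for-loop: builds (nxt, changed) from the current level
def levelStep (tree : List (Int × List Int)) (level : List Int) : List Int × Bool :=
  level.foldl (fun acc x =>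
    let children := treeGetD tree x
    if children = [] then (acc.1 ++ [x], acc.2) else (acc.1 ++ children, true))
    ([], false)

-- Source B's `while True` loop; the Nat is a fuel/totality guard on the number of
-- iterations, which under Pre_ is at most tree.length + 1.
def loopB (tree : List (Int × List Int)) : Nat → List Int → List Int
  | 0, level => level   -- fuel exhausted: unreachable under Pre_
  | n+1, level =>
      let r := levelStep tree level
      if r.2 then loopB tree n r.1 else level

def resolve_to_sections_alt (tree : List (Int × List Int)) (office_id : Int) : List Int :=
  loopB tree (tree.length + 1) [office_id]

-- ===== PRECONDITION & SPEC =====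
-- breadth-first frontier: nodes reachable from S in exactly one child step (deduplicated)
def frontierStep (tree : List (Int × List Int)) (S : List Int) : List Int :=
  (S.flatMap (fun x => treeGetD tree x)).dedup

-- Pre_ excludes exactly the inputs on which A does not return: when a cycle is reachable
-- from office_id the Python recursion raises RecursionError. Stated in closed form on the
-- input graph: no descending path from office_id is longer than tree.length (the
-- (tree.length+1)-th breadth-first frontier is empty), which by pigeonhole holds iff the
-- part of the graph reachable from office_id is acyclic.
def Pre_resolve_to_sections (tree : List (Int × List Int)) (office_id : Int) : Prop :=
  Nat.iterate (frontierStep tree) (tree.length + 1) [office_id] = []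

instance (tree : List (Int × List Int)) (office_id : Int) : Decidable (Pre_resolve_to_sections tree office_id) := by
  unfold Pre_resolve_to_sections; infer_instance

def pvWitness_resolve_to_sections : (List (Int × List Int)) × Int :=
  ([(1, [2, 3]), (3, [4, 2])], 1)

def Spec_resolve_to_sections (tree : List (Int × List Int)) (office_id : Int) (out : List Int) : Prop := out = resolve_to_sections_alt tree office_id
instance (tree : List (Int × List Int)) (office_id : Int) (out : List Int) : Decidable (Spec_resolve_to_sections tree office_id out) := by unfold Spec_resolve_to_sections; infer_instance

-- ===== CLAIM (what is proved, stated in full; the proofs are below) =====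
def Claim_equal_resolve_to_sections : Prop := ∀ (tree : List (Int × List Int)) (office_id : Int), Dom_resolve_to_sections tree office_id → Pre_resolve_to_sections tree office_id → Spec_resolve_to_sections tree office_id (resolve_to_sections tree office_id)

-- ===== LEMMAS AND PROOFS =====

-- "fuel n suffices for A's recursion at oid" (proof-side helper only)
def okA (tree : List (Int × List Int)) : Nat → Int → Bool
  | 0, _ => false
  | n+1, oid =>
      let children := treeGetD tree oid
      children = [] || children.all (okA tree n)

theorem okA_of_frontier (tree : List (Int × List Int)) :
    ∀ n S, Nat.iterate (frontierStep tree) n S = [] → ∀ x ∈ S, okA tree n x = true := by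
  intro n
  induction n with
  | zero => intro S h x hx; simp [Nat.iterate] at h; subst h; simp at hx
  | succ n ih =>
      intro S h x hx
      rw [Function.iterate_succ_apply] at h
      simp only [okA]
      by_cases hc : treeGetD tree x = []
      · simp [hc]
      · simp only [hc, decide_false, Bool.false_or, List.all_eq_true]
        intro c hcmem
        exact ih _ h c (by
          simp [frontierStep, List.mem_dedup, List.mem_flatMap]
          exact ⟨x, hx, hcmem⟩)

-- the leaf list of the subtree below oid, to recursion depth n (proof-side)
def leavesF (tree : List (Int × List Int)) : Nat → Int → List Int
  | 0, _ => []
  | n+1, oid =>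
      let children := treeGetD tree oid
      if children = [] then [oid] else children.flatMap (leavesF tree n)

-- A's recursion appends exactly the leaf list
theorem dfsA_leaves (tree : List (Int × List Int)) :
    ∀ n oid res, dfsA tree n oid res = res ++ leavesF tree n oid := by
  intro n
  induction n with
  | zero => intro oid res; simp [dfsA, leavesF]
  | succ n ih =>
      intro oid res
      simp only [dfsA, leavesF]
      by_cases hc : treeGetD tree oid = []
      · simp [hc]
      · simp only [hc, if_false]
        have : ∀ (cs : List Int) (r : List Int),
            cs.foldl (fun r c => dfsA tree n c r) r = r ++ cs.flatMap (leavesF tree n) := by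
          intro cs
          induction cs with
          | nil => intro r; simp
          | cons c cs ihl => intro r; simp [ih, List.flatMap]
        exact this _ _

-- the pure expansion of a level and its "changed" flag
def expandPure (tree : List (Int × List Int)) (level : List Int) : List Int :=
  level.flatMap (fun x => if treeGetD tree x = [] then [x] else treeGetD tree x)

def hasNonLeaf (tree : List (Int × List Int)) (level : List Int) : Bool :=
  level.any (fun x => !(treeGetD tree x == []))

theorem levelStep_gen (tree : List (Int × List Int)) :
    ∀ (level : List Int) (acc : List Int) (b : Bool),
      level.foldl (fun acc x =>
        let children := treeGetD tree x
        if children = [] then (acc.1 ++ [x], acc.2) else (acc.1 ++ children, true)) (acc, b)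
      = (acc ++ expandPure tree level, b || hasNonLeaf tree level) := by
  intro level
  induction level with
  | nil => intro acc b; simp [expandPure, hasNonLeaf]
  | cons x l ih =>
      intro acc b
      simp only [List.foldl_cons]
      by_cases hc : treeGetD tree x = []
      · simp [hc, ih, expandPure, hasNonLeaf]
      · simp [hc, ih, expandPure, hasNonLeaf]

theorem levelStep_eq (tree : List (Int × List Int)) (level : List Int) :
    levelStep tree level = (expandPure tree level, hasNonLeaf tree level) := by
  unfold levelStep
  simpa using levelStep_gen tree level [] false

-- one rewriting step corresponds to losing one unit of depth (unconditional)
theorem leaves_expand (tree : List (Int × List Int)) (m : Nat) :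
    ∀ level : List Int,
      level.flatMap (leavesF tree (m + 2)) = (expandPure tree level).flatMap (leavesF tree (m + 1)) := by
  intro level
  induction level with
  | nil => simp [expandPure]
  | cons x l ih =>
      have hx : leavesF tree (m + 2) x
          = (if treeGetD tree x = [] then [x] else treeGetD tree x).flatMap (leavesF tree (m + 1)) := by
        by_cases hc : treeGetD tree x = []
        · simp [leavesF, hc]
        · simp [leavesF, hc]
      simp only [expandPure] at ih ⊢
      simp [List.flatMap_cons, hx, ih]

theorem all_leaves_flatMap (tree : List (Int × List Int)) (m : Nat) :
    ∀ level : List Int, (∀ x ∈ level, treeGetD tree x = []) →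
      level.flatMap (leavesF tree (m + 1)) = level := by
  intro level
  induction level with
  | nil => simp
  | cons x l ih =>
      intro h
      have hx := h x (by simp)
      rw [List.flatMap_cons, ih (fun y hy => h y (by simp [hy]))]
      simp [leavesF, hx]

theorem hasNonLeaf_false (tree : List (Int × List Int)) (level : List Int)
    (h : hasNonLeaf tree level = false) : ∀ x ∈ level, treeGetD tree x = [] := by
  intro x hx
  simp only [hasNonLeaf, List.any_eq_false] at h
  have := h x hx
  simpa using this

theorem okA_expand (tree : List (Int × List Int)) (m : Nat) (level : List Int)
    (h : ∀ x ∈ level, okA tree (m + 2) x = true) :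
    ∀ y ∈ expandPure tree level, okA tree (m + 1) y = true := by
  intro y hy
  simp only [expandPure, List.mem_flatMap] at hy
  obtain ⟨x, hx, hmem⟩ := hy
  by_cases hc : treeGetD tree x = []
  · simp [hc] at hmem
    subst hmem
    simp [okA, hc]
  · simp only [hc, if_false] at hmem
    have := h x hx
    simp only [okA, hc, decide_false, Bool.false_or, List.all_eq_true] at this
    exact this y hmem

theorem loopB_succ (tree : List (Int × List Int)) (n : Nat) (level : List Int) :
    loopB tree (n + 1) level
      = if hasNonLeaf tree level = true then loopB tree n (expandPure tree level) else level := by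
  simp only [loopB, levelStep_eq]

-- main lemma: B's loop computes the flattened leaf list, given enough depth
theorem loopB_eq (tree : List (Int × List Int)) :
    ∀ m level, (∀ x ∈ level, okA tree (m + 1) x = true) →
      loopB tree (m + 1) level = level.flatMap (leavesF tree (m + 1)) := by
  intro m
  induction m with
  | zero =>
      intro level h
      rw [loopB_succ]
      have hleaf : ∀ x ∈ level, treeGetD tree x = [] := by
        intro x hx
        have := h x hx
        simp only [okA] at this
        rcases Bool.or_eq_true_iff.mp this with h1 | h1
        · simpa using h1
        · by_cases hc : treeGetD tree x = []
          · exact hc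
          · exfalso
            obtain ⟨c, hc1⟩ := List.exists_mem_of_ne_nil _ hc
            have := List.all_eq_true.mp h1 c hc1
            simp at this
      have hnl : hasNonLeaf tree level = false := by
        simp only [hasNonLeaf, List.any_eq_false]
        intro x hx; simp [hleaf x hx]
      simp [hnl, all_leaves_flatMap tree 0 level hleaf]
  | succ m ih =>
      intro level h
      rw [loopB_succ]
      by_cases hnl : hasNonLeaf tree level = true
      · rw [if_pos hnl, ih (expandPure tree level) (okA_expand tree m level h)]
        exact (leaves_expand tree m level).symm
      · simp only [Bool.not_eq_true] at hnl
        simp [hnl, (all_leaves_flatMap tree (m + 1) level (hasNonLeaf_false tree level hnl))]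

-- ===== VERDICT (by name: the statement is the Claim_ definition above) =====
theorem resolve_to_sections_spec : Claim_equal_resolve_to_sections := by
  intro tree office_id _ hpre
  unfold Spec_resolve_to_sections resolve_to_sections resolve_to_sections_alt
  have hok : okA tree (tree.length + 1) office_id = true :=
    okA_of_frontier tree _ _ hpre office_id (by simp)
  rw [dfsA_leaves, loopB_eq tree tree.length [office_id] (by simpa using hok)]
  simp
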